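-- pv_equiv track=rewrite | github.com/Petingoso/FundamentosP_ex | 06/03_pet.py | implode3
-- ===== SOURCE A (Python) =====
-- def implode3(tup):
--     if isinstance(tup,tuple):
--         num = 0
--         i=0
--         while i < len(tup):
--             if not(isinstance(tup[i],int) and 0<=tup[i]<=9):
--                 raise ValueError("elemento inválido")
--             num = num*10 + tup[i]
--             i+=1
--         return num
--     raise ValueError("tuplo inválido")
-- ===== SOURCE B (Python) =====
-- def implode3(tup):
--     if not isinstance(tup, tuple):
--         raise ValueError("tuplo inválido")
--     for x in tup:
--         if not (isinstance(x, int) and 0 <= x <= 9):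
--             raise ValueError("elemento inválido")
--     return sum(d * 10 ** i for i, d in enumerate(reversed(tup)))
-- ===== Notes on version B (the rewrite author's own statement) =====
-- stated objective: alternative
-- what changed: Validation is split into its own pass and the Horner multiply-accumulate while loop is replaced by a positional-notation sum: each digit times the power of ten of its position, via enumerate(reversed(tup)).
import Mathlib
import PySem

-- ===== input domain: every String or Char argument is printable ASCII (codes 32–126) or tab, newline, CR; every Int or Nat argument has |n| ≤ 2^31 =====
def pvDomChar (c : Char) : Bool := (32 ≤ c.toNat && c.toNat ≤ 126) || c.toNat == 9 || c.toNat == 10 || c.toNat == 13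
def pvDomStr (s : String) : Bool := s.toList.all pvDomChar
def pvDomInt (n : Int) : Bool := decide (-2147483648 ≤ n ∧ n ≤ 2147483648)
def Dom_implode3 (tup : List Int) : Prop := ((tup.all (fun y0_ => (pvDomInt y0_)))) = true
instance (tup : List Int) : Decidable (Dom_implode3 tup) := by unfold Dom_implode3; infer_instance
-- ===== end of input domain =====

-- B splits validation into its own pass and replaces A's Horner while loop by a
-- positional-notation sum (digit × power of ten over enumerate(reversed(tup))): alternative decomposition, same cost.


-- ===== PORT A =====
-- while loop over the tuple with accumulator num; 'raise ValueError' is unreachable inside Pre_ (modelled as 0)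
def implode3Go : List Int → Int → Int
  | [], num => num
  | d :: rest, num =>
    if 0 ≤ d ∧ d ≤ 9 then implode3Go rest (num * 10 + d)
    else 0  -- raise ValueError("elemento inválido") — excluded by Pre_
def implode3 (tup : List Int) : Int := implode3Go tup 0

-- ===== PORT B =====
def implode3_alt (tup : List Int) : Int :=
  if tup.any (fun x => !decide (0 ≤ x ∧ x ≤ 9)) then 0  -- raise ValueError("elemento inválido") — excluded by Pre_
  else ((PySem.List.enumerate tup.reverse 0).map (fun p => p.2 * 10 ^ p.1.toNat)).sum

-- ===== PRECONDITION & SPEC =====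
-- A raises ValueError on any element outside 0..9; exactly those inputs are excluded.
def Pre_implode3 (tup : List Int) : Prop := ∀ d ∈ tup, 0 ≤ d ∧ d ≤ 9
instance (tup : List Int) : Decidable (Pre_implode3 tup) := by unfold Pre_implode3; infer_instance
def pvWitness_implode3 : List Int := [1, 2, 3]
def Spec_implode3 (tup : List Int) (out : Int) : Prop := out = implode3_alt tup
instance (tup : List Int) (out : Int) : Decidable (Spec_implode3 tup out) := by unfold Spec_implode3; infer_instance

-- ===== CLAIM (what is proved, stated in full; the proofs are below) =====
def Claim_equal_implode3 : Prop := ∀ (tup : List Int), Dom_implode3 tup → Pre_implode3 tup → Spec_implode3 tup (implode3 tup)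

-- ===== LEMMAS AND PROOFS =====
lemma implode3Go_eq_sum (tup : List Int) :
    ∀ num : Int, (∀ d ∈ tup, 0 ≤ d ∧ d ≤ 9) →
      implode3Go tup num
        = num * 10 ^ tup.length
          + ((PySem.List.enumerate tup.reverse 0).map (fun p => p.2 * 10 ^ p.1.toNat)).sum := by
  induction tup with
  | nil => intro num _; simp [implode3Go, PySem.List.enumerate_nil]
  | cons d rest ih =>
    intro num h
    have hd : 0 ≤ d ∧ d ≤ 9 := h d (List.mem_cons_self ..)
    have hrest : ∀ x ∈ rest, 0 ≤ x ∧ x ≤ 9 := fun x hx => h x (List.mem_cons_of_mem _ hx)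
    simp only [implode3Go, if_pos hd]
    rw [ih _ hrest, List.reverse_cons, PySem.List.enumerate_append]
    simp [PySem.List.enumerate_cons, PySem.List.enumerate_nil]
    ring

-- ===== VERDICT (by name: the statement is the Claim_ definition above) =====
theorem implode3_spec : Claim_equal_implode3 := by
  intro tup _ hpre
  unfold Spec_implode3 implode3 implode3_alt
  have hany : tup.any (fun x => !decide (0 ≤ x ∧ x ≤ 9)) = false := by
    simp only [List.any_eq_false, Bool.not_eq_true', decide_eq_false_iff_not, not_not]
    exact hpre
  rw [hany, if_neg (by simp), implode3Go_eq_sum tup 0 hpre]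
  ring
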